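/-
  jsmn_d.bin: `jsmn_parse`, the loop head with the character dispatch (10046BH – 1004A1H and the compare chains at 1002A2H – 1002BDH,
  100311H – 100327H; 37 instructions), `parser->pos++` (100462H – 100468H, 3 instructions) and `case ':'` (100459H – 10045FH, 3 instructions).

  `AtCase.rcx` (ecx = pos) is claimed only at the closing bracket's entry 100329H: on the path through the bit test (1002B6H `mov ecx, ebx`)
  the characters 09H … 20H arrive at 100462H / 1002C3H with ecx = the character.
-/
import Prog.Jsmn.D.ParseLemmas

namespace X86
namespace J6
namespace D
open X86.User (CodeAt RegsKept Span FlagsOK Layout toNat_add_ofNat toNat_ofNat_lt' add_ofNat_add)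
open Jsmn JsmnDBytes

set_option maxRecDepth 100000
set_option maxHeartbeats 4000000
set_option linter.unusedSimpArgs false
set_option linter.unusedVariables false

/-! ### The character and the switch -/

/-- `js[i]` as the machine reads it. -/
theorem text_read {μ : User.Mem} {jsA : Word} {js : List UInt8} (ht : CodeAt μ jsA js) (i : Nat) (hi : i < js.length) :
    μ.readLE (jsA + UInt64.ofNat i) 1 = (charAt js i).toNat := by
  rw [User.Mem.readLE_one', ht i hi]
  simp [charAt, hi]

/-- The bit test of the switch (`movabs rax, 100002600H ; shr rax, cl ; test al, 1`): bits 9, 10, 13, 32 = tab, LF, CR, space. -/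
theorem ws_bit : ∀ k, k < 64 →
    ((((Word.shift .shr .w64 4294977024 (Word.low .w8 (UInt64.ofNat k))) &&& 1).toNat % 256 ≠ 0) ↔ (k = 9 ∨ k = 10 ∨ k = 13 ∨ k = 32)) := by
  decide

theorem dispatch_colon (ch : UInt8) (h : ch.toNat = 58) : Dispatch ch 0x100459 := Or.inl ⟨byte_eq_ofNat_of_toNat (k := 58) h (by omega), rfl⟩
theorem dispatch_quote (ch : UInt8) (h : ch.toNat = 34) : Dispatch ch 0x100416 := Or.inr (Or.inl ⟨byte_eq_ofNat_of_toNat (k := 34) h (by omega), rfl⟩)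
theorem dispatch_open (ch : UInt8) (h : ch.toNat = 123 ∨ ch.toNat = 91) : Dispatch ch 0x100344 :=
  Or.inr (Or.inr (Or.inl ⟨h.imp (fun h => byte_eq_ofNat_of_toNat (b := ch) (k := 123) h (by omega)) (fun h => byte_eq_ofNat_of_toNat (b := ch) (k := 91) h (by omega)), rfl⟩))
theorem dispatch_close (ch : UInt8) (h : ch.toNat = 125 ∨ ch.toNat = 93) : Dispatch ch 0x100329 :=
  Or.inr (Or.inr (Or.inr (Or.inl ⟨h.imp (fun h => byte_eq_ofNat_of_toNat (b := ch) (k := 125) h (by omega)) (fun h => byte_eq_ofNat_of_toNat (b := ch) (k := 93) h (by omega)), rfl⟩)))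
theorem dispatch_comma (ch : UInt8) (h : ch.toNat = 44) : Dispatch ch 0x1004a1 :=
  Or.inr (Or.inr (Or.inr (Or.inr (Or.inl ⟨byte_eq_ofNat_of_toNat (k := 44) h (by omega), rfl⟩))))
theorem dispatch_ws (ch : UInt8) (h : ch.toNat = 9 ∨ ch.toNat = 10 ∨ ch.toNat = 13 ∨ ch.toNat = 32) : Dispatch ch 0x100462 := by
  refine Or.inr (Or.inr (Or.inr (Or.inr (Or.inr (Or.inl ⟨?_, rfl⟩)))))
  rcases h with h | h | h | h
  · exact Or.inl (byte_eq_ofNat_of_toNat (k := 9) h (by omega))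
  · exact Or.inr (Or.inr (Or.inl (byte_eq_ofNat_of_toNat (k := 10) h (by omega))))
  · exact Or.inr (Or.inl (byte_eq_ofNat_of_toNat (k := 13) h (by omega)))
  · exact Or.inr (Or.inr (Or.inr (byte_eq_ofNat_of_toNat (k := 32) h (by omega))))
theorem dispatch_prim (ch : UInt8) (h : ch.toNat ≠ 58 ∧ ch.toNat ≠ 34 ∧ ch.toNat ≠ 123 ∧ ch.toNat ≠ 91 ∧ ch.toNat ≠ 125 ∧ ch.toNat ≠ 93 ∧
    ch.toNat ≠ 44 ∧ ch.toNat ≠ 9 ∧ ch.toNat ≠ 13 ∧ ch.toNat ≠ 10 ∧ ch.toNat ≠ 32) : Dispatch ch 0x1002c3 := by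
  obtain ⟨h1, h2, h3, h4, h5, h6, h7, h8, h9, h10, h11⟩ := h
  exact Or.inr (Or.inr (Or.inr (Or.inr (Or.inr (Or.inr ⟨byte_ne_ofNat_of_toNat (k := 58) h1 (by omega), byte_ne_ofNat_of_toNat (k := 34) h2 (by omega), byte_ne_ofNat_of_toNat (k := 123) h3 (by omega),
    byte_ne_ofNat_of_toNat (k := 91) h4 (by omega), byte_ne_ofNat_of_toNat (k := 125) h5 (by omega), byte_ne_ofNat_of_toNat (k := 93) h6 (by omega), byte_ne_ofNat_of_toNat (k := 44) h7 (by omega), byte_ne_ofNat_of_toNat (k := 9) h8 (by omega),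
    byte_ne_ofNat_of_toNat (k := 13) h9 (by omega), byte_ne_ofNat_of_toNat (k := 10) h10 (by omega), byte_ne_ofNat_of_toNat (k := 32) h11 (by omega), rfl⟩)))))

/-! ### The loop head -/

theorem more_of {js : List UInt8} {pos : Nat} {ch : UInt8} (hlt : pos < js.length) (hce : charAt js pos = ch) (hne : ch.toNat ≠ 0) :
    more js pos = true := by
  have : ch ≠ 0 := fun e => hne (by rw [e]; rfl)
  simp [more, hlt, hce, this]

set_option hygiene false in
/-- The end of a dispatch path: at the case entry `a`, by the dispatch lemma `d`. -/
macro "head_end " a:term ", " d:term : tactic => `(tactic| (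
  have hmore := more_of hlt hce (by v3_omega)
  refine Reach.done (Or.inr ⟨$a, $d _ (by v3_omega), ⟨by v3_regnorm, hfr.of_kept (by v3_memnorm) (by v3_kept), ?_, ?_, hmore, hce.symm⟩⟩)
  · v3_regnorm; exact Word.low32_ofNat_byte _
  · first
      | (intro _; v3_regnorm; done)
      | (intro h; exact absurd h (by decide))))

theorem head_spec (n : User.Layout) : HeadSpec n := by
  intro c v0 v s hrip hfr
  have hcode := hfr.core.code
  have htext := hfr.core.text
  have hf := hfr.core
  have hpos := hfr.inv.pos
  v3_open hf.rbp hf.r14 hf.r13 hf.parser hf.entry.pre.jslt hf.entry.pre.env.parserR hf.entry.pre.env.jsR hf.entry.pre.call.nle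
  have hlow : Word.low .w32 (UInt64.ofNat s.p.pos) = UInt64.ofNat s.p.pos := by v3_omega
  by_cases hlt : s.p.pos < c.js.length
  · -- a character is read
    have hch := text_read htext s.p.pos hlt
    have hc256 := (charAt c.js s.p.pos).toNat_lt
    generalize hce : charAt c.js s.p.pos = ch at hch hc256 ⊢
    v3_walk hcode hf.entry.pre.call.fetch [hlow, hch] until [0x1004f9, 0x100459, 0x100416, 0x100344, 0x100329, 0x1004a1, 0x100462, 0x1002c3]
    · -- NUL: the loop ends
      have h0 : ch = 0 := byte_eq_ofNat_of_toNat (k := 0) (by v3_omega) (by omega)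
      have hmore : more c.js s.p.pos = false := by simp [more, hce, h0]
      exact Reach.done (Or.inl ⟨hmore, by v3_regnorm, hfr.of_kept (by v3_memnorm) (by v3_kept)⟩)
    · head_end 0x100459, dispatch_colon
    · head_end 0x100344, dispatch_open
    · head_end 0x100344, dispatch_open
    · head_end 0x1002c3, dispatch_prim
    · head_end 0x100329, dispatch_close
    · head_end 0x100329, dispatch_close
    · head_end 0x1002c3, dispatch_prim
    · head_end 0x100416, dispatch_quote
    · head_end 0x1002c3, dispatch_prim
    · head_end 0x1002c3, dispatch_prim
    · -- the bit test: whitespace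
      have hws := (ws_bit ch.toNat (by v3_omega)).mp hbr_1002bd
      clear hbr_1002bd
      head_end 0x100462, dispatch_ws
    · -- the bit test: another control character
      have hws : ¬ (ch.toNat = 9 ∨ ch.toNat = 10 ∨ ch.toNat = 13 ∨ ch.toNat = 32) := fun h => (ws_bit ch.toNat (by v3_omega)).mpr h hbr_1002bd
      clear hbr_1002bd
      head_end 0x1002c3, dispatch_prim
    · head_end 0x1002c3, dispatch_prim
    · head_end 0x1004a1, dispatch_comma
  · -- pos ≥ len: the loop ends
    have hmore : more c.js s.p.pos = false := by simp [more, hlt]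
    v3_walk hcode hf.entry.pre.call.fetch [hlow] until [0x1004f9]
    exact Reach.done (Or.inl ⟨hmore, by v3_regnorm, hfr.of_kept (by v3_memnorm) (by v3_kept)⟩)

/-! ### `parser->pos++` and `case ':'` -/

/-- 100462H → 10046BH: `parser->pos++` (three instructions; one store into the parser struct). -/
theorem next_spec (n : User.Layout) : NextSpec n := by
  intro c v0 v s ⟨hrip, hfr⟩
  have hcode := hfr.core.code
  have hf := hfr.core
  have hpos := hfr.inv.pos
  v3_open hf.rbp hf.parser hf.entry.pre.env.parserR hf.entry.pre.call.nle
  v3_walk hcode hf.entry.pre.call.fetch [] until [0x10046b]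
  have hu : (Word.low .w32 (UInt64.ofNat s.p.pos + 1)).toNat = u32 ((s.p.pos : Int) + 1) := by unfold u32; v3_omega
  have hi := hfr.inv
  refine Reach.done ⟨by v3_regnorm, ⟨hf.store_parser (a := c.pa) (by v3_memnorm; rfl) (by v3_kept) ⟨by omega, by omega⟩ ⟨?_, ?_, ?_⟩, ?_, hfr.cnt,
    ⟨by dsimp only; exact u32_lt _, hi.toknextR, hi.superR, hi.numR, fun ts h => ⟨(hi.toks ts h).len, (hi.toks ts h).small, (hi.toks ts h).toknext,
      (hi.toks ts h).superLo, (hi.toks ts h).superHi, (hi.toks ts h).links⟩⟩⟩⟩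
  · rw [← hu]; v3_read
  · v3_frame hf_parser_toknext
  · v3_frame hf_parser_toksuper
  · v3_regnorm; exact hfr.r15

/-- 100459H → 100462H: `case ':'`, `parser->toksuper = parser->toknext - 1`. The invariant of the new state comes from `SafeFacts.body`. -/
theorem colon_spec (sf : SafeFacts binD.cfg) (n : User.Layout) : ColonSpec n := by
  intro c v0 v s ch fuel hch hat hne
  subst hch
  have hb : body Config.default c.js fuel c.numTokens s 0x3a = some (.next { s with p := { s.p with toksuper := i32 (s.p.toknext - 1) } }) := by
    simp [body]
  rw [hb]
  show Reach n v (AtNext c n v0 · _)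
  have hfr := hat.frame
  have hrip := hat.rip
  have hcode := hfr.core.code
  have hf := hfr.core
  have htn := hfr.inv.toknextR
  v3_open hf.rbp hf.parser hf.entry.pre.env.parserR hf.entry.pre.call.nle
  v3_walk hcode hf.entry.pre.call.fetch [] until [0x100462]
  have hu : (Word.low .w32 (UInt64.ofNat s.p.toknext - 1)).toNat = u32 ((s.p.toknext : Int) - 1) := by unfold u32; v3_omega
  obtain ⟨hinv, hcnt, _⟩ := (sf.body c.js fuel c.numTokens s 0x3a hfr.inv hfr.cnt).1 _ hb
  refine Reach.done ⟨by v3_regnorm, ⟨hf.store_parser (a := c.pa + 8) (by v3_memnorm; rfl) (by v3_kept) ⟨by v3_omega, by v3_omega⟩ ⟨?_, ?_, ?_⟩, ?_, hcnt, hinv⟩⟩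
  · v3_frame hf_parser_pos
  · v3_frame hf_parser_toknext
  · exact holds32_read (by rw [← hu]; v3_read) (holds32_i32 _)
  · v3_regnorm; exact hfr.r15

end D
end J6
end X86
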